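-- pv_equiv track=rewrite | github.com/pypi-data/pypi-mirror-8 | packages/lexor/lexor-0.1.2c1.tar.gz/lexor-0.1.2c1/lexor/command/to.py | split_at
-- ===== SOURCE A (Python) =====
-- def split_at(delimiter, text, opens='[<(', closes=']>)', quotes='"\''):
--     """Custom function to split at commas. Taken from stackoverflow
--     http://stackoverflow.com/a/20599372/788553"""
--     result = []
--     buff = ""
--     level = 0
--     is_quoted = False
--     for char in text:
--         if char in delimiter and level == 0 and not is_quoted:
--             result.append(buff)
--             buff = ""
--         else:
--             buff += char
--             if char in opens:
--                 level += 1
--             elif char in closes: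
--                 level -= 1
--             elif char in quotes:
--                 is_quoted = not is_quoted
--     if not buff == "":
--         result.append(buff)
--     return result
-- ===== SOURCE B (Python) =====
-- def split_at(delimiter, text, opens='[<(', closes=']>)', quotes='"\''):
--     # Two-phase: record top-level delimiter positions, then slice the text.
--     positions = []
--     level = 0
--     is_quoted = False
--     for i, char in enumerate(text):
--         if char in delimiter and level == 0 and not is_quoted:
--             positions.append(i)
--         elif char in opens:
--             level += 1
--         elif char in closes:
--             level -= 1
--         elif char in quotes:
--             is_quoted = not is_quoted
--     parts = []
--     prev = 0
--     for p in positions: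
--         parts.append(text[prev:p])
--         prev = p + 1
--     parts.append(text[prev:])
--     if parts[-1] == "":
--         parts.pop()
--     return parts
-- ===== Notes on version B (the rewrite author's own statement) =====
-- stated objective: alternative
-- what changed: B replaces A's incremental buffer-building (append every character to a growing buffer, flush it at each top-level delimiter) with a two-phase position/slice algorithm: one scan records the indices of top-level unquoted delimiters without building any buffer, then the text is sliced between consecutive recorded positions and a trailing empty part is dropped.
import Mathlib
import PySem

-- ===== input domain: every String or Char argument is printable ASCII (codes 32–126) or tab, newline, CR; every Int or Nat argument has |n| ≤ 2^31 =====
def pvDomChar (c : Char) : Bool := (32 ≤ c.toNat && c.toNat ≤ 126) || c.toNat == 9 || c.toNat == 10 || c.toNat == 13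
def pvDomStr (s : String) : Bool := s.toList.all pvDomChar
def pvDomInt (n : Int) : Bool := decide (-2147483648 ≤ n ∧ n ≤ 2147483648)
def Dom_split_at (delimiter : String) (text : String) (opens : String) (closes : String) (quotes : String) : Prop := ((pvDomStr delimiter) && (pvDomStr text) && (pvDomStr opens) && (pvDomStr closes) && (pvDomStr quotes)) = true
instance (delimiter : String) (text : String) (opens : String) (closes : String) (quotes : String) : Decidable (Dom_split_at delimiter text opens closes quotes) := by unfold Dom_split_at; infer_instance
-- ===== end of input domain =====

-- B replaces A's buffer-accumulating scan by a two-phase algorithm (record top-level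
-- delimiter positions, then slice the text between them); same cost, different structure.

-- ===== PORT A =====
-- A's loop body: state (result, buff, level, is_quoted); 'c in s' on a single char is
-- exactly membership of that char in s (PySem-exact on this domain), ported as List.contains.
def pvStepA (d os cl qs : List Char) : (List String × List Char × Int × Bool) → Char → (List String × List Char × Int × Bool)
  | (res, buff, level, isq), c =>
    if d.contains c = true ∧ level = 0 ∧ isq = false then
      (res ++ [String.ofList buff], [], level, isq)
    else
      if os.contains c = true then (res, buff ++ [c], level + 1, isq)
      else if cl.contains c = true then (res, buff ++ [c], level - 1, isq)
      else if qs.contains c = true then (res, buff ++ [c], level, !isq)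
      else (res, buff ++ [c], level, isq)

-- A's epilogue: 'if not buff == "": result.append(buff)'
def pvFinishA (st : List String × List Char × Int × Bool) : List String :=
  if st.2.1 ≠ [] then st.1 ++ [String.ofList st.2.1] else st.1

def split_at (delimiter : String) (text : String) (opens : String) (closes : String) (quotes : String) : List String :=
  pvFinishA (text.toList.foldl (pvStepA delimiter.toList opens.toList closes.toList quotes.toList) ([], [], 0, false))

-- ===== PORT B =====
-- B's scan: state (positions, level, is_quoted), folded over enumerate(text)
def pvStepB (d os cl qs : List Char) : (List Int × Int × Bool) → (Int × Char) → (List Int × Int × Bool)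
  | (ps, level, isq), (i, c) =>
    if d.contains c = true ∧ level = 0 ∧ isq = false then (ps ++ [i], level, isq)
    else if os.contains c = true then (ps, level + 1, isq)
    else if cl.contains c = true then (ps, level - 1, isq)
    else if qs.contains c = true then (ps, level, !isq)
    else (ps, level, isq)

-- B's second loop body: parts.append(text[prev:p]); prev = p + 1
def pvBuildStep (t : List Char) (s : List String × Int) (p : Int) : List String × Int :=
  (s.1 ++ [String.ofList (PySem.List.slice t (some s.2) (some p))], p + 1)

-- B's epilogue: parts.append(text[prev:]); drop a trailing empty part
def pvFinishB (t : List Char) (ps : List Int) : List String :=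
  let pr := ps.foldl (pvBuildStep t) ([], 0)
  let parts := pr.1 ++ [String.ofList (PySem.List.slice t (some pr.2) none)]
  if parts.getLast? = some "" then parts.dropLast else parts

def split_at_alt (delimiter : String) (text : String) (opens : String) (closes : String) (quotes : String) : List String :=
  pvFinishB text.toList
    (((PySem.List.enumerate text.toList).foldl
        (pvStepB delimiter.toList opens.toList closes.toList quotes.toList) ([], 0, false)).1)

-- ===== PRECONDITION & SPEC =====
def Spec_split_at (delimiter : String) (text : String) (opens : String) (closes : String) (quotes : String) (out : List String) : Prop := out = split_at_alt delimiter text opens closes quotes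
instance (delimiter : String) (text : String) (opens : String) (closes : String) (quotes : String) (out : List String) : Decidable (Spec_split_at delimiter text opens closes quotes out) := by unfold Spec_split_at; infer_instance

-- ===== CLAIM (what is proved, stated in full; the proofs are below) =====
def Claim_equal_split_at : Prop := ∀ (delimiter : String) (text : String) (opens : String) (closes : String) (quotes : String), Dom_split_at delimiter text opens closes quotes → Spec_split_at delimiter text opens closes quotes (split_at delimiter text opens closes quotes)

-- ===== LEMMAS AND PROOFS =====

lemma pv_ofList_eq_empty_iff (l : List Char) : String.ofList l = "" ↔ l = [] := by
  constructor
  · intro h; have := congrArg String.toList h; simpa using this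
  · intro h; subst h; rfl

lemma pv_take_snoc (t : List Char) (prev i : Nat) (c : Char) (hpi : prev ≤ i)
    (hc : t[i]? = some c) :
    (t.drop prev).take (i - prev) ++ [c] = (t.drop prev).take (i + 1 - prev) := by
  rw [show i + 1 - prev = (i - prev) + 1 by omega, List.take_add_one]
  have h2 : (t.drop prev)[i - prev]? = some c := by
    rw [List.getElem?_drop, show prev + (i - prev) = i by omega]; exact hc
  rw [h2]
  rfl

-- The invariant tying A's (result, buff) to B's recorded positions: buff is exactly
-- the slice of the text from just after the last recorded position up to the cursor,
-- and replaying B's build loop on the recorded positions yields A's result so far.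
lemma pv_main (d os cl qs t : List Char) (cs : List Char) :
    ∀ (i prev : Nat) (res : List String) (ps : List Int) (level : Int) (isq : Bool),
      cs = t.drop i → prev ≤ i →
      ps.foldl (pvBuildStep t) ([], 0) = (res, (prev : Int)) →
      pvFinishA (cs.foldl (pvStepA d os cl qs) (res, (t.drop prev).take (i - prev), level, isq))
        = pvFinishB t (((PySem.List.enumerate cs (i : Int)).foldl (pvStepB d os cl qs) (ps, level, isq)).1) := by
  induction cs with
  | nil =>
    intro i prev res ps level isq hcs hpi hps
    have hlen : t.length ≤ i := List.drop_eq_nil_iff.mp hcs.symm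
    have hbuff : (t.drop prev).take (i - prev) = t.drop prev :=
      List.take_of_length_le (by simp; omega)
    simp only [PySem.List.enumerate_nil, List.foldl_nil]
    unfold pvFinishA pvFinishB
    rw [hps]
    simp only [hbuff, PySem.List.slice_from_natCast]
    by_cases hd : t.drop prev = []
    · simp [hd]
    · have hne : String.ofList (t.drop prev) ≠ "" :=
        fun h => hd ((pv_ofList_eq_empty_iff _).mp h)
      simp [hd, hne]
  | cons c cs ih =>
    intro i prev res ps level isq hcs hpi hps
    have hi : i < t.length := by
      by_contra h
      rw [List.drop_eq_nil_iff.mpr (by omega)] at hcs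
      simp at hcs
    have hc : t[i]? = some c := by
      have h0 : (t.drop i)[0]? = some c := by rw [← hcs]; rfl
      rw [List.getElem?_drop] at h0; simpa using h0
    have hcs' : cs = t.drop (i + 1) := by
      have := congrArg List.tail hcs
      simpa [List.tail_drop] using this
    rw [PySem.List.enumerate_cons]
    simp only [List.foldl_cons]
    by_cases h1 : d.contains c = true ∧ level = 0 ∧ isq = false
    · have hA : pvStepA d os cl qs (res, (t.drop prev).take (i - prev), level, isq) c
          = (res ++ [String.ofList ((t.drop prev).take (i - prev))], ([] : List Char), level, isq) := by
        simp only [pvStepA, if_pos h1]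
      have hB : pvStepB d os cl qs (ps, level, isq) ((i : Int), c)
          = (ps ++ [(i : Int)], level, isq) := by
        simp only [pvStepB, if_pos h1]
      rw [hA, hB]
      have hps' : (ps ++ [(i : Int)]).foldl (pvBuildStep t) ([], 0)
          = (res ++ [String.ofList ((t.drop prev).take (i - prev))], ((i + 1 : Nat) : Int)) := by
        rw [List.foldl_append, hps]
        simp only [List.foldl_cons, List.foldl_nil, pvBuildStep, PySem.List.slice_natCast]
        push_cast
        rfl
      have h := ih (i + 1) (i + 1) (res ++ [String.ofList ((t.drop prev).take (i - prev))])
        (ps ++ [(i : Int)]) level isq hcs' (le_refl _) hps'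
      rw [show ((i : Int) + 1) = ((i + 1 : Nat) : Int) by push_cast; ring]
      simpa using h
    · have key : ∃ l' q',
          pvStepA d os cl qs (res, (t.drop prev).take (i - prev), level, isq) c
            = (res, (t.drop prev).take (i - prev) ++ [c], l', q')
          ∧ pvStepB d os cl qs (ps, level, isq) ((i : Int), c) = (ps, l', q') := by
        simp only [pvStepA, pvStepB, if_neg h1]
        split_ifs <;> exact ⟨_, _, rfl, rfl⟩
      obtain ⟨l', q', hA, hB⟩ := key
      rw [hA, hB, pv_take_snoc t prev i c hpi hc]
      have h := ih (i + 1) prev res ps l' q' hcs' (by omega) hps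
      rw [show ((i : Int) + 1) = ((i + 1 : Nat) : Int) by push_cast; ring]
      simpa using h

-- ===== VERDICT (by name: the statement is the Claim_ definition above) =====
theorem split_at_spec : Claim_equal_split_at := by
  intro delimiter text opens closes quotes _
  show split_at delimiter text opens closes quotes = split_at_alt delimiter text opens closes quotes
  unfold split_at split_at_alt
  have h := pv_main delimiter.toList opens.toList closes.toList quotes.toList text.toList
    text.toList 0 0 [] [] 0 false (by simp) (le_refl 0) (by simp)
  simpa using h
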